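-- pv_equiv track=rewrite | github.com/AleksVersus/howdo_faq | ответы/HTML_foo-reserve.py | minLiLevel
-- ===== SOURCE A (Python) =====
-- def minLiLevel(string_array):
-- 	level=None
-- 	count=0
-- 	for t,l,s in string_array:
-- 		if (level==None or level>l) and t!=None:
-- 			level=l
-- 			count+=1 # сколько раз встречается максимальный уровень
-- 	return level,count
-- ===== SOURCE B (Python) =====
-- def minLiLevel(string_array):
--     valid = [l for t, l, s in string_array if t != None]
--     if not valid:
--         return None, 0
--     mins = [valid[0]]
--     for x in valid[1:]:
--         mins.append(min(mins[-1], x))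
--     count = 1 + sum(1 for a, b in zip(mins, mins[1:]) if b < a)
--     return mins[-1], count
-- ===== Notes on version B (the rewrite author's own statement) =====
-- stated objective: alternative
-- what changed: B replaces A's single conditional-state loop by a pipeline: filter out None-tagged entries, build the running-minimum list, return its last element and 1 + the number of strict adjacent decreases.
import Mathlib
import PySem

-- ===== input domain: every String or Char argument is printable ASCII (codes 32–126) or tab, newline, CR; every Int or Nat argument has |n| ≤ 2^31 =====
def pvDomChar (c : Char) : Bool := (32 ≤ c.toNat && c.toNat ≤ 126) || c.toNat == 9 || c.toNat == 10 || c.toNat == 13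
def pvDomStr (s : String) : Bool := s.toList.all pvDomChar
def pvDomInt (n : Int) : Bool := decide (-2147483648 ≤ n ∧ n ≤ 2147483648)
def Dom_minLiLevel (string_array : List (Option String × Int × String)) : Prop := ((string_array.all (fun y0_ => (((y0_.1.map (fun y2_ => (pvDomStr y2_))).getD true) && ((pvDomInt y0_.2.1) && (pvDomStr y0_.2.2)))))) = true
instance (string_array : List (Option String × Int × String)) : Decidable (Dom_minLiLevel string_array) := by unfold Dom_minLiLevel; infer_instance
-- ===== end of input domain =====

-- B replaces A's conditional-state loop by a pipeline (filter levels, running-min list, count strict adjacent decreases); same O(n) cost, alternative decomposition.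


-- ===== PORT A =====
def minLiLevel (string_array : List (Option String × Int × String)) : Option Int × Int :=
  string_array.foldl
    (fun st tls =>
      if ((match st.1 with | none => true | some lv => decide (lv > tls.2.1)) && tls.1.isSome)
      then (some tls.2.1, st.2 + 1) else st)
    (none, 0)

-- ===== PORT B =====
-- B: filter the levels of non-None-tagged entries, build the running-minimum list,
-- answer = (its last element, 1 + number of strict adjacent decreases).
def minLiLevel_alt (string_array : List (Option String × Int × String)) : Option Int × Int :=
  let valid := string_array.filterMap (fun tls => if tls.1.isSome then some tls.2.1 else none)
  match valid with
  | [] => (none, 0)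
  | v :: vs =>
    let mins := List.scanl min v vs
    let count : Int := 1 + ((mins.zip mins.tail).countP (fun p => decide (p.2 < p.1)) : Nat)
    (some (mins.getLastD v), count)

-- ===== PRECONDITION & SPEC =====
def Spec_minLiLevel (string_array : List (Option String × Int × String)) (out : Option Int × Int) : Prop := out = minLiLevel_alt string_array
instance (string_array : List (Option String × Int × String)) (out : Option Int × Int) : Decidable (Spec_minLiLevel string_array out) := by unfold Spec_minLiLevel; infer_instance

-- ===== CLAIM (what is proved, stated in full; the proofs are below) =====
def Claim_equal_minLiLevel : Prop := ∀ (string_array : List (Option String × Int × String)), Dom_minLiLevel string_array → Spec_minLiLevel string_array (minLiLevel string_array)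

-- ===== LEMMAS AND PROOFS =====
-- A's loop step on the filtered level list
def pvStepV (st : Option Int × Int) (l : Int) : Option Int × Int :=
  if (match st.1 with | none => true | some lv => decide (lv > l)) then (some l, st.2 + 1) else st

-- decrease-count of the running-min list starting at m over vs, as B computes it
def pvCnt (m : Int) (vs : List Int) : Nat :=
  ((List.scanl min m vs).zip (List.scanl min m vs).tail).countP (fun p => decide (p.2 < p.1))

lemma scanl_getLastD_irrel (b : Int) (l : List Int) (d d' : Int) :
    (List.scanl min b l).getLastD d = (List.scanl min b l).getLastD d' := by
  cases l with
  | nil => simp [List.scanl_nil]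
  | cons x xs => rw [List.scanl_cons, List.getLastD_cons, List.getLastD_cons]

lemma foldl_filter (sa : List (Option String × Int × String)) (st : Option Int × Int) :
    sa.foldl
      (fun st tls =>
        if ((match st.1 with | none => true | some lv => decide (lv > tls.2.1)) && tls.1.isSome)
        then (some tls.2.1, st.2 + 1) else st) st
    = (sa.filterMap (fun tls => if tls.1.isSome then some tls.2.1 else none)).foldl pvStepV st := by
  induction sa generalizing st with
  | nil => rfl
  | cons h tl ih =>
    obtain ⟨t, l, s⟩ := h
    cases t with
    | none =>
      simp only [List.foldl_cons, Option.isSome_none, Bool.and_false, Bool.false_eq_true,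
        if_false, List.filterMap_cons]
      exact ih st
    | some tv =>
      simp only [List.foldl_cons, Option.isSome_some, Bool.and_true, List.filterMap_cons, if_true]
      rw [ih]
      rfl

lemma scanl_getLastD_cons (b x d : Int) (l : List Int) :
    (x :: List.scanl min b l).getLastD d = (List.scanl min b l).getLastD b := by
  rw [List.getLastD_cons]
  exact scanl_getLastD_irrel b l x b

lemma pvCnt_cons (m l : Int) (vs : List Int) :
    pvCnt m (l :: vs) = (if l < m then 1 else 0) + pvCnt (min m l) vs := by
  cases vs with
  | nil =>
    simp only [pvCnt, List.scanl_cons, List.scanl_nil, List.tail_cons, List.zip_cons_cons,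
      List.zip_nil_right, List.countP_cons, List.countP_nil, List.zip_nil_left]
    by_cases hl : l < m
    · have : min m l < m := by omega
      simp [hl, this]
    · have : ¬ min m l < m := by omega
      simp [hl, this]
  | cons w ws =>
    simp only [pvCnt, List.scanl_cons, List.tail_cons, List.zip_cons_cons, List.countP_cons]
    by_cases hl : l < m
    · have : min m l < m := by omega
      simp [hl, this]
      omega
    · have : ¬ min m l < m := by omega
      simp [hl, this]

lemma foldl_stepV (vs : List Int) (m : Int) (c : Int) :
    vs.foldl pvStepV (some m, c)
      = (some ((List.scanl min m vs).getLastD m), c + (pvCnt m vs : Nat)) := by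
  induction vs generalizing m c with
  | nil => simp [pvCnt, List.scanl_nil]
  | cons l vs ih =>
    rw [List.scanl_cons, pvCnt_cons]
    by_cases h : m > l
    · have hmin : min m l = l := min_eq_right (le_of_lt h)
      have hd : decide (m > l) = true := by simpa using h
      simp only [List.foldl_cons, pvStepV, hd, if_true]
      rw [ih l (c + 1), hmin]
      refine Prod.ext ?_ ?_
      · simp only [Option.some.injEq]
        rw [scanl_getLastD_cons]
      · simp only
        have : l < m := h
        simp [this]
        push_cast
        omega
    · have hmin : min m l = m := min_eq_left (le_of_not_gt h)
      have hd : decide (m > l) = false := by simpa using h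
      simp only [List.foldl_cons, pvStepV, hd, Bool.false_eq_true, if_false]
      rw [ih m c, hmin]
      refine Prod.ext ?_ ?_
      · simp only [Option.some.injEq]
        rw [scanl_getLastD_cons]
      · simp only
        have : ¬ l < m := h
        simp [this]

-- ===== VERDICT (by name: the statement is the Claim_ definition above) =====
theorem minLiLevel_spec : Claim_equal_minLiLevel := by
  intro sa _
  unfold Spec_minLiLevel minLiLevel minLiLevel_alt
  rw [foldl_filter]
  cases hv : sa.filterMap (fun tls => if tls.1.isSome then some tls.2.1 else none) with
  | nil => rfl
  | cons v vs =>
    simp only [List.foldl_cons]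
    have h1 : pvStepV (none, 0) v = (some v, 1) := by simp [pvStepV]
    rw [h1, foldl_stepV]
    simp [pvCnt]
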